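-- pv_equiv track=rewrite | github.com/Leezj9671/ctf_py | nctf_vig.py | getKeyPool
-- ===== SOURCE A (Python) =====
-- def getKeyPool(cipher, stepSet, plainSet, keySet):
--
--     keyPool = dict()
--     for step in stepSet:
--         maybe = [None] * step
--         for pos in range(step):
--             maybe[pos] = []
--             for k in keySet:
--                 flag = 1
--                 for c in cipher[pos::step]:
--                     if c ^ k not in plainSet:
--                         flag = 0
--                 if flag:
--                     maybe[pos].append(k)
--         for posPool in maybe:
--             if len(posPool) == 0:
--                 maybe = []
--                 break
--         if len(maybe) != 0:
--             keyPool[step] = maybe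
--     return keyPool
-- ===== SOURCE B (Python) =====
-- def getKeyPool(cipher, stepSet, plainSet, keySet):
--     keyPool = {}
--     for step in stepSet:
--         maybe = []
--         ok = True
--         for pos in range(step):
--             cand = None
--             for c in set(cipher[pos::step]):
--                 shifted = {c ^ p for p in plainSet}
--                 cand = shifted if cand is None else cand & shifted
--             pool = list(keySet) if cand is None else [k for k in keySet if k in cand]
--             if not pool:
--                 ok = False
--                 break
--             maybe.append(pool)
--         if ok and maybe:
--             keyPool[step] = maybe
--     return keyPool
-- ===== Notes on version B (the rewrite author's own statement) =====
-- stated objective: faster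
-- what changed: Instead of testing every key against every ciphertext byte of the residue class (A's |keySet|x|slice| inner scans), B intersects, over the DISTINCT cipher bytes of each residue class, the sets {c ^ p : p in plainSet} of keys that byte admits, and then filters keySet once by membership in the intersection, breaking out of a step as soon as one position has no keys.
import Mathlib
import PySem

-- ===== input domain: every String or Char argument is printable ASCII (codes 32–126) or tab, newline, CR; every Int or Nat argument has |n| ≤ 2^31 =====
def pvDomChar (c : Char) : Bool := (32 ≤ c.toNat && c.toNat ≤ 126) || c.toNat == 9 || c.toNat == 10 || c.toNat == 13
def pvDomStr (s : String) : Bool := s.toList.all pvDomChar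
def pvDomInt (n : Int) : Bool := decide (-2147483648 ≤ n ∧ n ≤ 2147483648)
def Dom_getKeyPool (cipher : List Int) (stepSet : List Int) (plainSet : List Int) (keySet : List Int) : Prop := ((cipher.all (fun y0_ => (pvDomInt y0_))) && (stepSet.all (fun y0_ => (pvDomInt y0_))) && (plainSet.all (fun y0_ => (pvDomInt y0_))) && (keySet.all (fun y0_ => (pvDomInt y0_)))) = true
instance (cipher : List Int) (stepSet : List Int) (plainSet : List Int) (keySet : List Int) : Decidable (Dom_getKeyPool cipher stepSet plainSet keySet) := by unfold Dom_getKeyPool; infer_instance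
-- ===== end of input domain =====

-- B replaces A's per-key scan of each residue class by one set-intersection over the
-- distinct cipher bytes of the class followed by a single filter of keySet (faster).


-- ===== PORT A =====
-- 'maybe = [None] * step': every slot is assigned by the pos-loop before it is read,
-- so the None placeholder is represented by [] (exact).
-- 'cipher[pos::step]': inside the pos-loop step ≥ 1, so slice? is always 'some' (none only for step = 0).
def getKeyPool (cipher : List Int) (stepSet : List Int) (plainSet : List Int) (keySet : List Int) : List (Int × List (List Int)) :=
  (stepSet.foldl (fun keyPool step =>
    let maybe0 : Array (List Int) := Array.replicate step.toNat []
    let maybe :=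
      (PySem.List.pyRange 0 step 1).foldl (fun maybe pos =>
        let posList := keySet.foldl (fun posList k =>
          let flag : Int :=
            ((PySem.List.slice? cipher (some pos) none step).getD []).foldl
              (fun flag c => if !(plainSet.contains (PySem.Int.bxor c k)) then 0 else flag) 1
          if flag ≠ 0 then posList ++ [k] else posList) []
        -- maybe[pos] = posList; pos ranges over 0..step-1, always in bounds and nonnegative
        maybe.set! pos.toNat posList) maybe0
    -- 'for posPool in maybe: if len(posPool)==0: maybe=[]; break' as a fold with a break flag
    let maybe2 := ((maybe.toList).foldl (fun st posPool =>
        if st.2 then st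
        else if posPool.length = 0 then (([] : List (List Int)), true) else st) (maybe.toList, false)).1
    if maybe2.length ≠ 0 then keyPool.insert step maybe2 else keyPool)
    (PySem.Dict.empty : PySem.Dict Int (List (List Int)))).items

-- ===== PORT B =====
-- state (maybe, ok); 'ok = false' is the broken-out state of the pos-loop
def getKeyPool_alt (cipher : List Int) (stepSet : List Int) (plainSet : List Int) (keySet : List Int) : List (Int × List (List Int)) :=
  (stepSet.foldl (fun keyPool step =>
    let st :=
      (PySem.List.pyRange 0 step 1).foldl (fun st pos =>
        if st.2 then
          let cand : Option (PySem.Set Int) :=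
            (PySem.Set.ofList ((PySem.List.slice? cipher (some pos) none step).getD [])).foldl
              (fun cand c =>
                let shifted : PySem.Set Int :=
                  PySem.Set.ofList (plainSet.map (fun p => PySem.Int.bxor c p))
                some (cand.elim shifted (fun s => PySem.Set.inter s shifted))) none
          let pool := cand.elim keySet (fun s => keySet.filter (fun k => PySem.Set.contains s k))
          -- maybe.append(pool): a Python list is a dynamic array, append = Array.push
          if pool.length = 0 then (st.1, false) else (st.1.push pool, true)
        else st)
        ((#[] : Array (List Int)), true)
    if st.2 ∧ st.1.toList ≠ [] then keyPool.insert step st.1.toList else keyPool)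
    (PySem.Dict.empty : PySem.Dict Int (List (List Int)))).items

-- ===== PRECONDITION & SPEC =====
def Spec_getKeyPool (cipher : List Int) (stepSet : List Int) (plainSet : List Int) (keySet : List Int) (out : List (Int × List (List Int))) : Prop := out = getKeyPool_alt cipher stepSet plainSet keySet
instance (cipher : List Int) (stepSet : List Int) (plainSet : List Int) (keySet : List Int) (out : List (Int × List (List Int))) : Decidable (Spec_getKeyPool cipher stepSet plainSet keySet out) := by unfold Spec_getKeyPool; infer_instance

-- ===== CLAIM (what is proved, stated in full; the proofs are below) =====
def Claim_equal_getKeyPool : Prop := ∀ (cipher : List Int) (stepSet : List Int) (plainSet : List Int) (keySet : List Int), Dom_getKeyPool cipher stepSet plainSet keySet → Spec_getKeyPool cipher stepSet plainSet keySet (getKeyPool cipher stepSet plainSet keySet)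


-- ===== LEMMAS AND PROOFS =====

-- Python ^ is an involution: c ^ (c ^ k) = k
theorem bxor_invol (c k : Int) : PySem.Int.bxor c (PySem.Int.bxor c k) = k := by
  unfold PySem.Int.bxor
  by_cases hc : 0 ≤ c <;> by_cases hk : 0 ≤ k <;> split_ifs <;> simp_all <;> omega

-- the residue-class slice both programs read at (step, pos)
def pvSlice (cipher : List Int) (step pos : Int) : List Int :=
  (PySem.List.slice? cipher (some pos) none step).getD []

-- the key test both programs implement at (step, pos)
def pvQ (cipher plainSet : List Int) (step pos k : Int) : Bool :=
  (pvSlice cipher step pos).all (fun c => plainSet.contains (PySem.Int.bxor c k))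

-- the pool of keys both programs produce at (step, pos)
def pvVal (cipher plainSet keySet : List Int) (step pos : Int) : List Int :=
  keySet.filter (fun k => pvQ cipher plainSet step pos k)

-- A's flag loop is an all-test
theorem flag_foldl (l : List Int) (p : Int → Bool) : ∀ f : Int,
    l.foldl (fun flag c => if !(p c) then 0 else flag) f = if l.all p then f else 0 := by
  induction l with
  | nil => simp
  | cons c t ih =>
    intro f
    by_cases hc : p c = true
    · simpa [hc] using ih f
    · have h0 := ih 0
      simp [hc] at h0 ⊢
      simpa using h0

-- A's append-if-flag loop over keySet is a filter
theorem posList_eq (keySet : List Int) (flagf : Int → Int) (q : Int → Bool)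
    (h : ∀ k, (flagf k ≠ 0) ↔ q k = true) :
    keySet.foldl (fun acc k => if flagf k ≠ 0 then acc ++ [k] else acc) [] = keySet.filter q := by
  rw [PySem.List.foldl_append_ite_eq_filter]
  simp only [List.nil_append]
  apply List.filter_congr
  intro k _
  simp [h k]

-- assigning every index of a size-n array in order is a map over the range
theorem foldl_setBang_map (val : Int → List Int) (n : Nat) :
    ∀ (m : Nat) (init : Array (List Int)), init.size = n → m ≤ n →
    ((PySem.List.pyRange 0 m 1).foldl (fun arr pos => arr.set! pos.toNat (val pos)) init).toList
      = ((PySem.List.pyRange 0 m 1).map val) ++ init.toList.drop m := by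
  intro m
  induction m with
  | zero => simp
  | succ m ih =>
    intro init hlen hm
    have hcast : ((m : Int) + 1) = ((m + 1 : Nat) : Int) := by push_cast; ring
    have hsplit : PySem.List.pyRange 0 ((m + 1 : Nat) : Int) 1
        = PySem.List.pyRange 0 (m : Int) 1 ++ [(m : Int)] := by
      rw [← hcast, PySem.List.pyRange_one_succ_right (by exact_mod_cast Nat.zero_le m)]
    rw [hsplit, List.foldl_append, List.map_append]
    have hmn : m < n := hm
    have hlenpre : ((PySem.List.pyRange 0 (m : Int) 1).map val).length = m := by
      simp [PySem.List.length_pyRange_one]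
    simp only [List.foldl_cons, List.foldl_nil, List.map_cons, List.map_nil]
    rw [show ∀ (a : Array (List Int)) v, a.set! ((m : Int)).toNat v = a.setIfInBounds m v from
      fun a v => by simp [Array.set!]]
    rw [Array.toList_setIfInBounds, ih init hlen (Nat.le_of_succ_le hm)]
    rw [List.set_append]
    have hdrop : init.toList.drop m
        = init.toList[m]'(by simpa [hlen] using hmn) :: init.toList.drop (m + 1) := by
      rw [List.drop_eq_getElem_cons (by simpa [hlen] using hmn)]
    rw [hdrop]
    simp only [hlenpre, lt_self_iff_false, if_false, Nat.sub_self,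
      List.set_cons_zero, List.append_assoc, List.singleton_append]

-- A's check loop: once broken, the state is frozen
theorem stayA (l : List (List Int)) : ∀ (cur : List (List Int)),
    l.foldl (fun st posPool =>
        if st.2 then st
        else if posPool.length = 0 then (([] : List (List Int)), true) else st) (cur, true)
      = (cur, true) := by
  induction l with
  | nil => intro cur; rfl
  | cons x t ih => intro cur; simpa using ih cur

-- A's check loop: empties the list iff some pool is empty
theorem breakA (l : List (List Int)) : ∀ (cur : List (List Int)),
    l.foldl (fun st posPool =>
        if st.2 then st
        else if posPool.length = 0 then (([] : List (List Int)), true) else st) (cur, false)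
      = if l.any (fun p => p.length == 0) then (([] : List (List Int)), true) else (cur, false) := by
  induction l with
  | nil => intro cur; simp
  | cons x t ih =>
    intro cur
    rw [List.foldl_cons]
    by_cases hx : x.length = 0
    · rw [if_neg (by simp), if_pos hx, stayA]
      simp [List.length_eq_zero_iff.mp hx]
    · rw [if_neg (by simp), if_neg hx, ih cur]
      have : (x.length == 0) = false := by simpa using hx
      simp [this]

-- B's candidate after the intersection loop, as a membership test
def okCand (o : Option (PySem.Set Int)) (k : Int) : Bool :=
  o.elim true (fun s => PySem.Set.contains s k)

theorem okCand_foldl (plainSet : List Int) (ds : List Int) :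
    ∀ (o : Option (PySem.Set Int)) (k : Int),
    okCand (ds.foldl (fun cand c =>
        some (cand.elim (PySem.Set.ofList (plainSet.map (fun p => PySem.Int.bxor c p)))
          (fun s => PySem.Set.inter s
            (PySem.Set.ofList (plainSet.map (fun p => PySem.Int.bxor c p)))))) o) k = true
    ↔ (okCand o k = true ∧ ∀ c ∈ ds, plainSet.contains (PySem.Int.bxor c k) = true) := by
  have hx : ∀ (c k : Int), (∃ a ∈ plainSet, PySem.Int.bxor c a = k) ↔ PySem.Int.bxor c k ∈ plainSet := by
    intro c k
    constructor
    · rintro ⟨a, ha, rfl⟩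
      simpa [bxor_invol c a] using ha
    · intro h
      exact ⟨PySem.Int.bxor c k, h, bxor_invol c k⟩
  induction ds with
  | nil => intro o k; simp
  | cons c t ih =>
    intro o k
    rw [List.foldl_cons]
    cases o with
    | none =>
      rw [ih]
      simp [okCand, hx]
    | some s =>
      rw [ih]
      simp [okCand, PySem.Set.mem_inter, hx, and_assoc]

theorem pool_eq_filter (keySet : List Int) (o : Option (PySem.Set Int)) :
    o.elim keySet (fun s => keySet.filter (fun k => PySem.Set.contains s k))
    = keySet.filter (fun k => okCand o k) := by
  cases o with
  | none => simp [okCand]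
  | some s => rfl

-- B's pos loop: once ok is false, the state is frozen
theorem bstay (pool : Int → List Int) (l : List Int) :
    ∀ st : Array (List Int) × Bool, st.2 = false →
    l.foldl (fun st pos =>
        if st.2 then
          (if (pool pos).length = 0 then (st.1, false) else (st.1.push (pool pos), true))
        else st) st = st := by
  induction l with
  | nil => intro st _; rfl
  | cons x t ih =>
    intro st h
    rw [List.foldl_cons, if_neg (by simp [h])]
    exact ih st h

-- B's pos loop when every pool is nonempty: pushes all pools
theorem bfold_all (pool : Int → List Int) (l : List Int)
    (h : ∀ pos ∈ l, (pool pos).length ≠ 0) : ∀ acc : Array (List Int),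
    l.foldl (fun st pos =>
        if st.2 then
          (if (pool pos).length = 0 then (st.1, false) else (st.1.push (pool pos), true))
        else st) (acc, true)
    = ((l.map pool).foldl Array.push acc, true) := by
  induction l with
  | nil => intro acc; simp
  | cons x t ih =>
    intro acc
    rw [List.foldl_cons, if_pos rfl, if_neg (h x (by simp))]
    rw [ih (fun pos hp => h pos (by simp [hp])) (acc.push (pool x))]
    simp

-- B's pos loop when some pool is empty: ends broken
theorem bfold_break (pool : Int → List Int) (l : List Int) :
    ∀ acc : Array (List Int), (∃ pos ∈ l, (pool pos).length = 0) →
    (l.foldl (fun st pos =>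
        if st.2 then
          (if (pool pos).length = 0 then (st.1, false) else (st.1.push (pool pos), true))
        else st) (acc, true)).2 = false := by
  induction l with
  | nil => rintro acc ⟨pos, h, _⟩; simp at h
  | cons x t ih =>
    rintro acc ⟨pos, hmem, hlen⟩
    rw [List.foldl_cons, if_pos rfl]
    by_cases hx : (pool x).length = 0
    · rw [if_pos hx, bstay pool t (acc, false) rfl]
    · rw [if_neg hx]
      rcases List.mem_cons.mp hmem with rfl | hmem'
      · exact absurd hlen hx
      · exact ih (acc.push (pool x)) ⟨pos, hmem', hlen⟩

-- A's per-position keySet loop produces exactly the filtered pool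
theorem posList_val (cipher plainSet keySet : List Int) (step pos : Int) :
    keySet.foldl (fun posList k =>
      if (((PySem.List.slice? cipher (some pos) none step).getD []).foldl
            (fun (flag : Int) c => if !(plainSet.contains (PySem.Int.bxor c k)) then 0 else flag) 1) ≠ 0
      then posList ++ [k] else posList) []
    = pvVal cipher plainSet keySet step pos := by
  unfold pvVal
  apply posList_eq keySet
      (fun k => ((PySem.List.slice? cipher (some pos) none step).getD []).foldl
        (fun (flag : Int) c => if !(plainSet.contains (PySem.Int.bxor c k)) then 0 else flag) 1)
      (fun k => pvQ cipher plainSet step pos k)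
  intro k
  rw [flag_foldl]
  unfold pvQ pvSlice
  split_ifs with h <;> simp_all [List.all_eq_true]

-- B's per-position candidate intersection + filter produces the same pool
theorem poolB_val (cipher plainSet keySet : List Int) (step pos : Int) :
    ((PySem.Set.ofList ((PySem.List.slice? cipher (some pos) none step).getD [])).foldl
        (fun cand c =>
          some (cand.elim (PySem.Set.ofList (plainSet.map (fun p => PySem.Int.bxor c p)))
            (fun s => PySem.Set.inter s
              (PySem.Set.ofList (plainSet.map (fun p => PySem.Int.bxor c p)))))) none).elim
      keySet (fun s => keySet.filter (fun k => PySem.Set.contains s k))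
    = pvVal cipher plainSet keySet step pos := by
  rw [pool_eq_filter]
  unfold pvVal
  apply List.filter_congr
  intro k _
  have hiff := okCand_foldl plainSet
      ((PySem.Set.ofList ((PySem.List.slice? cipher (some pos) none step).getD [])) : List Int) none k
  cases hq : pvQ cipher plainSet step pos k
  · cases ho : okCand ((PySem.Set.ofList ((PySem.List.slice? cipher (some pos) none step).getD [])).foldl
        (fun cand c =>
          some (cand.elim (PySem.Set.ofList (plainSet.map (fun p => PySem.Int.bxor c p)))
            (fun s => PySem.Set.inter s
              (PySem.Set.ofList (plainSet.map (fun p => PySem.Int.bxor c p)))))) none) k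
    · rfl
    · exfalso
      have hall := (hiff.mp ho).2
      have : pvQ cipher plainSet step pos k = true := by
        unfold pvQ pvSlice
        rw [List.all_eq_true]
        intro c hc
        exact hall c ((PySem.Set.mem_ofList _ _).mpr hc)
      simp [this] at hq
  · apply hiff.mpr
    refine ⟨rfl, ?_⟩
    intro c hc
    unfold pvQ pvSlice at hq
    rw [List.all_eq_true] at hq
    exact hq c ((PySem.Set.mem_ofList _ _).mp hc)

-- A's body and B's body agree for every single step
theorem step_eq (cipher plainSet keySet : List Int)
    (kp : PySem.Dict Int (List (List Int))) (step : Int) :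
    (let maybe0 : Array (List Int) := Array.replicate step.toNat []
     let maybe :=
       (PySem.List.pyRange 0 step 1).foldl (fun maybe pos =>
         let posList := keySet.foldl (fun posList k =>
           let flag : Int :=
             ((PySem.List.slice? cipher (some pos) none step).getD []).foldl
               (fun flag c => if !(plainSet.contains (PySem.Int.bxor c k)) then 0 else flag) 1
           if flag ≠ 0 then posList ++ [k] else posList) []
         maybe.set! pos.toNat posList) maybe0
     let maybe2 := ((maybe.toList).foldl (fun st posPool =>
         if st.2 then st
         else if posPool.length = 0 then (([] : List (List Int)), true) else st) (maybe.toList, false)).1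
     if maybe2.length ≠ 0 then kp.insert step maybe2 else kp)
    =
    (let st :=
       (PySem.List.pyRange 0 step 1).foldl (fun st pos =>
         if st.2 then
           let cand : Option (PySem.Set Int) :=
             (PySem.Set.ofList ((PySem.List.slice? cipher (some pos) none step).getD [])).foldl
               (fun cand c =>
                 let shifted : PySem.Set Int :=
                   PySem.Set.ofList (plainSet.map (fun p => PySem.Int.bxor c p))
                 some (cand.elim shifted (fun s => PySem.Set.inter s shifted))) none
           let pool := cand.elim keySet (fun s => keySet.filter (fun k => PySem.Set.contains s k))
           if pool.length = 0 then (st.1, false) else (st.1.push pool, true)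
         else st)
         ((#[] : Array (List Int)), true)
     if st.2 ∧ st.1.toList ≠ [] then kp.insert step st.1.toList else kp) := by
  by_cases hstep : 0 < step
  · obtain ⟨n, rfl⟩ : ∃ n : Nat, step = (n : Int) := ⟨step.toNat, (Int.toNat_of_nonneg hstep.le).symm⟩
    have hn : 0 < n := by exact_mod_cast hstep
    simp only [Int.toNat_natCast]
    -- replace A's per-position loop by the common pool
    have hA : (fun (maybe : Array (List Int)) (pos : Int) => maybe.set! pos.toNat
        (keySet.foldl (fun posList k =>
          if (((PySem.List.slice? cipher (some pos) none ((n : Nat) : Int)).getD []).foldl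
               (fun (flag : Int) c => if !(plainSet.contains (PySem.Int.bxor c k)) then 0 else flag) 1) ≠ 0
          then posList ++ [k] else posList) []))
        = fun maybe pos => maybe.set! pos.toNat (pvVal cipher plainSet keySet (n : Int) pos) := by
      funext maybe pos
      rw [posList_val]
    rw [hA]
    rw [foldl_setBang_map (pvVal cipher plainSet keySet (n : Int)) n n
        (Array.replicate n ([] : List Int)) (Array.size_replicate) (le_refl n)]
    -- replace B's per-position body by the common pool
    have hB : (fun (st : Array (List Int) × Bool) (pos : Int) =>
        if st.2 then
          (if (((PySem.Set.ofList ((PySem.List.slice? cipher (some pos) none ((n : Nat) : Int)).getD [])).foldl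
              (fun cand c =>
                some (cand.elim (PySem.Set.ofList (plainSet.map (fun p => PySem.Int.bxor c p)))
                  (fun s => PySem.Set.inter s
                    (PySem.Set.ofList (plainSet.map (fun p => PySem.Int.bxor c p)))))) none).elim
              keySet (fun s => keySet.filter (fun k => PySem.Set.contains s k))).length = 0
           then (st.1, false)
           else (st.1.push (((PySem.Set.ofList ((PySem.List.slice? cipher (some pos) none ((n : Nat) : Int)).getD [])).foldl
              (fun cand c =>
                some (cand.elim (PySem.Set.ofList (plainSet.map (fun p => PySem.Int.bxor c p)))
                  (fun s => PySem.Set.inter s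
                    (PySem.Set.ofList (plainSet.map (fun p => PySem.Int.bxor c p)))))) none).elim
              keySet (fun s => keySet.filter (fun k => PySem.Set.contains s k))), true))
        else st)
        = fun (st : Array (List Int) × Bool) (pos : Int) =>
        if st.2 then
          (if (pvVal cipher plainSet keySet ((n : Nat) : Int) pos).length = 0 then (st.1, false)
           else (st.1.push (pvVal cipher plainSet keySet ((n : Nat) : Int) pos), true))
        else st := by
      funext st pos
      rw [poolB_val]
    rw [hB]
    rw [breakA]
    simp only [Array.toList_replicate, List.drop_replicate, Nat.sub_self, List.replicate_zero,
      List.append_nil]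
    by_cases hany : ∃ pos ∈ PySem.List.pyRange 0 ((n : Nat) : Int) 1,
        (pvVal cipher plainSet keySet (n : Int) pos).length = 0
    · have h2 := bfold_break (pvVal cipher plainSet keySet (n : Int))
        (PySem.List.pyRange 0 ((n : Nat) : Int) 1) #[] hany
      have hanyb : ((PySem.List.pyRange 0 ((n : Nat) : Int) 1).map
          (pvVal cipher plainSet keySet (n : Int))).any (fun p => p.length == 0) = true := by
        rcases hany with ⟨pos, hmem, hlen⟩
        simp only [List.any_map, List.any_eq_true]
        exact ⟨pos, hmem, by simpa using hlen⟩
      rw [hanyb]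
      simp at h2
      simp [h2]
    · have hall : ∀ pos ∈ PySem.List.pyRange 0 ((n : Nat) : Int) 1,
          (pvVal cipher plainSet keySet (n : Int) pos).length ≠ 0 := by
        intro pos hmem hlen
        exact hany ⟨pos, hmem, hlen⟩
      have hanyb : ((PySem.List.pyRange 0 ((n : Nat) : Int) 1).map
          (pvVal cipher plainSet keySet (n : Int))).any (fun p => p.length == 0) = false := by
        simp only [List.any_map, List.any_eq_false]
        intro pos hmem
        simpa using hall pos hmem
      rw [hanyb]
      rw [bfold_all (pvVal cipher plainSet keySet (n : Int))
          (PySem.List.pyRange 0 ((n : Nat) : Int) 1) hall #[]]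
      have hlenmap : ((PySem.List.pyRange 0 ((n : Nat) : Int) 1).map
          (pvVal cipher plainSet keySet (n : Int))).length = n := by
        simp [PySem.List.length_pyRange_one]
      have hn0 : n ≠ 0 := by omega
      have hne : ((PySem.List.pyRange 0 ((n : Nat) : Int) 1).map
          (pvVal cipher plainSet keySet (n : Int))) ≠ [] := by
        intro h
        rw [h] at hlenmap
        simp at hlenmap
        omega
      simp [hlenmap, hn0, hne]
  · rw [PySem.List.pyRange_one_eq_nil (by omega : step ≤ 0)]
    simp [Int.toNat_of_nonpos (by omega : step ≤ 0)]

-- ===== VERDICT (by name: the statement is the Claim_ definition above) =====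
theorem getKeyPool_spec : Claim_equal_getKeyPool := by
  intro cipher stepSet plainSet keySet _
  unfold Spec_getKeyPool getKeyPool getKeyPool_alt
  congr 1
  apply PySem.List.foldl_congr_mem
  intro kp step _
  exact step_eq cipher plainSet keySet kp step
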